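-- pv_equiv track=rewrite | github.com/MiskaMoska/maptools | network/mapping/noc_mapper.py | genReverseS
-- ===== SOURCE A (Python) =====
-- from typing import List, Dict, Tuple
--
-- def genReverseS(w,h)->List:
--     '''
--     generate reverse-s path
--     '''
--     rs_path = []
--     for i in range(h):
--         for j in range(w):
--             if i % 2:
--                 rs_path.append((i+1)*w-j-1)
--             else:
--                 rs_path.append(i*w+j)
--     return rs_path
-- ===== SOURCE B (Python) =====
-- def genReverseS(w, h):
--     '''
--     generate reverse-s path
--     '''
--     if w <= 0 or h <= 0:
--         return []
--     flat = iter(range(w * h))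
--     out = []
--     for i in range(h):
--         chunk = [next(flat) for _ in range(w)]
--         if i % 2:
--             chunk.reverse()
--         out += chunk
--     return out
-- ===== Notes on version B (the rewrite author's own statement) =====
-- stated objective: alternative
-- what changed: Instead of A's nested per-element loops computing each index arithmetically with an even/odd branch, B generates the flat forward ordering once as range(w*h) and consumes it as a stream, peeling one w-sized chunk per row and reversing the odd chunks.
import Mathlib
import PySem

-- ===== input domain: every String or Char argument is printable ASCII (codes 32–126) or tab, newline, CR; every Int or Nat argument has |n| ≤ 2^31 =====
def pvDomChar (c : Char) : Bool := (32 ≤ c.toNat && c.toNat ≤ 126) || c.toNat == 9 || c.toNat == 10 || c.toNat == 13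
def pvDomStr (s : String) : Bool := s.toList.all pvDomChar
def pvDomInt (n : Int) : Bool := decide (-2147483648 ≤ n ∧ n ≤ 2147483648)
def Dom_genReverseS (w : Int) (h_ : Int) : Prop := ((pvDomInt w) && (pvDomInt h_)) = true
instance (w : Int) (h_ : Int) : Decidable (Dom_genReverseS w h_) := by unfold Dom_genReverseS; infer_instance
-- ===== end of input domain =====

-- B builds the flat forward ordering range(w*h) once and peels it into w-sized chunks, reversing
-- the odd chunks, instead of A's nested per-element loops with index arithmetic (objective: alternative).


-- ===== PORT A =====
-- rs_path.append(x) is modelled O(1) as prepend, with one final reverse (same loops, same order)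
def genReverseS (w : Int) (h_ : Int) : List Int :=
  ((PySem.List.pyRange 0 h_ 1).foldl (fun rs i =>
    (PySem.List.pyRange 0 w 1).foldl (fun rs j =>
      if PySem.Int.mod i 2 ≠ 0 then ((i + 1) * w - j - 1) :: rs else (i * w + j) :: rs) rs) []).reverse

-- ===== PORT B =====
-- flat = iter(range(w*h)); each row takes the next w items off the stream ('[next(flat) for _ in range(w)]'
-- = take/drop of the remaining stream, exact here since the stream holds exactly w*h items), odd chunks are
-- reversed; 'out += chunk' is modelled O(1) as reversed-prepend, undone by the single final reverse.
def genReverseS_alt (w : Int) (h_ : Int) : List Int :=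
  if w ≤ 0 ∨ h_ ≤ 0 then []
  else
    (((PySem.List.pyRange 0 h_ 1).foldl (fun (st : List Int × List Int) i =>
        let chunk := st.1.take w.toNat
        let chunk := if PySem.Int.mod i 2 ≠ 0 then chunk.reverse else chunk
        (st.1.drop w.toNat, chunk.reverse ++ st.2))
      (PySem.List.pyRange 0 (w * h_) 1, [])).2).reverse

-- ===== PRECONDITION & SPEC =====
def Spec_genReverseS (w : Int) (h_ : Int) (out : List Int) : Prop := out = genReverseS_alt w h_
instance (w : Int) (h_ : Int) (out : List Int) : Decidable (Spec_genReverseS w h_ out) := by unfold Spec_genReverseS; infer_instance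

-- ===== CLAIM (what is proved, stated in full; the proofs are below) =====
def Claim_equal_genReverseS : Prop := ∀ (w : Int) (h_ : Int), Dom_genReverseS w h_ → Spec_genReverseS w h_ (genReverseS w h_)

-- ===== LEMMAS AND PROOFS =====

-- the forward row i of the grid: [i*w, (i+1)*w)
def rowF (w i : Int) : List Int := PySem.List.pyRange (i * w) ((i + 1) * w) 1
-- the row as the reverse-S path emits it: reversed when i is odd
def rowA (w i : Int) : List Int := if PySem.Int.mod i 2 ≠ 0 then (rowF w i).reverse else rowF w i

theorem length_rowF (w i : Int) : (rowF w i).length = w.toNat := by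
  unfold rowF
  rw [PySem.List.length_pyRange_one]
  congr 1; ring

theorem mapOdd (w i : Int) :
    (PySem.List.pyRange 0 w 1).map (fun j => (i + 1) * w - j - 1) = (rowF w i).reverse := by
  have h1 : (rowF w i).reverse = PySem.List.pyRange ((i + 1) * w - 1) (i * w - 1) (-1) := by
    unfold rowF
    rw [PySem.List.pyRange_neg_one_eq_reverse]
    have e1 : i * w - 1 + 1 = i * w := by ring
    have e2 : (i + 1) * w - 1 + 1 = (i + 1) * w := by ring
    rw [e1, e2]
  rw [h1, PySem.List.pyRange_neg_one, PySem.List.pyRange_one, List.map_map]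
  have h2 : ((i + 1) * w - 1 - (i * w - 1)) = w - 0 := by ring
  rw [h2]
  exact List.map_congr_left (fun k _ => by simp only [Function.comp_apply]; ring)

theorem mapEven (w i : Int) :
    (PySem.List.pyRange 0 w 1).map (fun j => i * w + j) = rowF w i := by
  unfold rowF
  rw [PySem.List.pyRange_one, PySem.List.pyRange_one, List.map_map]
  have h2 : ((i + 1) * w - i * w) = w - 0 := by ring
  rw [h2]
  exact List.map_congr_left (fun k _ => by simp only [Function.comp_apply]; ring)

-- a cons-accumulator loop is the reverse of the mapped list
theorem foldl_cons_eq (f : Int → Int) (l : List Int) :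
    ∀ rs : List Int, l.foldl (fun acc x => f x :: acc) rs = (l.map f).reverse ++ rs := by
  induction l with
  | nil => intro rs; rfl
  | cons x xs ih =>
    intro rs
    simp only [List.foldl_cons, List.map_cons, List.reverse_cons, ih]
    simp

-- A's inner loop pushes exactly rowA, reversed, onto the accumulator
theorem innerA (w i : Int) (rs : List Int) :
    (PySem.List.pyRange 0 w 1).foldl (fun rs j =>
      if PySem.Int.mod i 2 ≠ 0 then ((i + 1) * w - j - 1) :: rs else (i * w + j) :: rs) rs
    = (rowA w i).reverse ++ rs := by
  by_cases hc : PySem.Int.mod i 2 ≠ 0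
  · have hfun : (fun (rs : List Int) (j : Int) =>
        if PySem.Int.mod i 2 ≠ 0 then ((i + 1) * w - j - 1) :: rs else (i * w + j) :: rs)
        = (fun rs j => ((i + 1) * w - j - 1) :: rs) := by
      funext rs j; rw [if_pos hc]
    rw [hfun, foldl_cons_eq, rowA, if_pos hc, mapOdd]
  · have hfun : (fun (rs : List Int) (j : Int) =>
        if PySem.Int.mod i 2 ≠ 0 then ((i + 1) * w - j - 1) :: rs else (i * w + j) :: rs)
        = (fun rs j => (i * w + j) :: rs) := by
      funext rs j; rw [if_neg hc]
    rw [hfun, foldl_cons_eq, rowA, if_neg hc, mapEven]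

-- pushing reversed blocks and reversing at the end is flatMap
theorem foldl_revblock_eq (g : Int → List Int) (l : List Int) :
    ∀ rs : List Int, l.foldl (fun acc i => (g i).reverse ++ acc) rs = (l.flatMap g).reverse ++ rs := by
  induction l with
  | nil => intro rs; simp
  | cons x xs ih =>
    intro rs
    simp only [List.foldl_cons, List.flatMap_cons, List.reverse_append, ih]
    simp

theorem A_eq_flatMap (w h_ : Int) :
    genReverseS w h_ = (PySem.List.pyRange 0 h_ 1).flatMap (rowA w) := by
  unfold genReverseS
  have key : ∀ l : List Int, ∀ rs : List Int,
      l.foldl (fun rs i =>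
        (PySem.List.pyRange 0 w 1).foldl (fun rs j =>
          if PySem.Int.mod i 2 ≠ 0 then ((i + 1) * w - j - 1) :: rs else (i * w + j) :: rs) rs) rs
      = l.foldl (fun rs i => (rowA w i).reverse ++ rs) rs := by
    intro l rs
    simp only [innerA]
  rw [key, foldl_revblock_eq, List.append_nil, List.reverse_reverse]

-- the flat range is the concatenation of the forward rows
theorem flat_range (w : Int) (hw : 0 ≤ w) (H : ℕ) :
    PySem.List.pyRange 0 ((H : Int) * w) 1 = (PySem.List.pyRange 0 (H : Int) 1).flatMap (rowF w) := by
  induction H with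
  | zero => simp [PySem.List.pyRange_one_eq_nil]
  | succ n ih =>
    have hc : ((n + 1 : ℕ) : Int) = (n : Int) + 1 := by push_cast; ring
    rw [hc, PySem.List.pyRange_one_succ_right (by positivity), List.flatMap_append, ← ih]
    have h2 : (0 : Int) ≤ (n : Int) * w := mul_nonneg (by positivity) hw
    have h3 : (n : Int) * w ≤ ((n : Int) + 1) * w := by nlinarith
    rw [PySem.List.pyRange_one_append 0 ((n : Int) * w) (((n : Int) + 1) * w) h2 h3]
    simp [rowF]

theorem flat_zero (w h_ : Int) (hw : 0 ≤ w) (hh : 0 ≤ h_) :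
    PySem.List.pyRange 0 (w * h_) 1 = (PySem.List.pyRange 0 h_ 1).flatMap (rowF w) := by
  have hwh : w * h_ = (h_.toNat : Int) * w := by
    rw [Int.toNat_of_nonneg hh]; ring
  rw [hwh, flat_range w hw h_.toNat, Int.toNat_of_nonneg hh]

-- B's peeling loop: consuming the concatenated rows chunk by chunk emits rowA row by row
theorem Binv (w h_ : Int) :
    ∀ (k : ℕ) (a : Int) (racc : List Int), 0 ≤ a → (h_ - a).toNat = k →
    ((PySem.List.pyRange a h_ 1).foldl (fun (st : List Int × List Int) i =>
        let chunk := st.1.take w.toNat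
        let chunk := if PySem.Int.mod i 2 ≠ 0 then chunk.reverse else chunk
        (st.1.drop w.toNat, chunk.reverse ++ st.2))
      ((PySem.List.pyRange a h_ 1).flatMap (rowF w), racc)).2
    = ((PySem.List.pyRange a h_ 1).flatMap (rowA w)).reverse ++ racc := by
  intro k
  induction k with
  | zero =>
    intro a racc ha hk
    rw [PySem.List.pyRange_one_eq_nil (by omega)]
    simp
  | succ n ih =>
    intro a racc ha hk
    rw [PySem.List.pyRange_one_cons (by omega : a < h_)]
    simp only [List.flatMap_cons, List.foldl_cons]
    have htake : ((rowF w a ++ (PySem.List.pyRange (a + 1) h_ 1).flatMap (rowF w)).take w.toNat)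
        = rowF w a := by
      rw [← length_rowF w a, List.take_left]
    have hdrop : ((rowF w a ++ (PySem.List.pyRange (a + 1) h_ 1).flatMap (rowF w)).drop w.toNat)
        = (PySem.List.pyRange (a + 1) h_ 1).flatMap (rowF w) := by
      rw [← length_rowF w a, List.drop_left]
    have hchunk : (if PySem.Int.mod a 2 ≠ 0
        then ((rowF w a ++ (PySem.List.pyRange (a + 1) h_ 1).flatMap (rowF w)).take w.toNat).reverse
        else (rowF w a ++ (PySem.List.pyRange (a + 1) h_ 1).flatMap (rowF w)).take w.toNat)
        = rowA w a := by
      rw [htake, rowA]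
    simp only [hchunk, hdrop]
    rw [ih (a + 1) ((rowA w a).reverse ++ racc) (by omega) (by omega)]
    rw [List.reverse_append]
    simp [List.append_assoc]

-- ===== VERDICT (by name: the statement is the Claim_ definition above) =====
theorem genReverseS_spec : Claim_equal_genReverseS := by
  intro w h_ _
  unfold Spec_genReverseS genReverseS_alt
  by_cases hz : w ≤ 0 ∨ h_ ≤ 0
  · rw [if_pos hz, A_eq_flatMap]
    rcases hz with hz | hz
    · exact List.flatMap_eq_nil_iff.mpr (fun i _ => by
        rw [rowA, rowF]
        have hnil : PySem.List.pyRange (i * w) ((i + 1) * w) 1 = [] := by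
          apply PySem.List.pyRange_one_eq_nil; nlinarith
        split_ifs <;> simp [hnil])
    · rw [PySem.List.pyRange_one_eq_nil (by omega)]; rfl
  · rw [if_neg (by omega), A_eq_flatMap, flat_zero w h_ (by omega) (by omega)]
    rw [Binv w h_ (h_ - 0).toNat 0 [] (by omega) rfl]
    simp
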